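-- pv_equiv track=rewrite | github.com/galaxygoose/Hyperclass | reverse_image_search.py | _create_better_description
-- ===== SOURCE A (Python) =====
-- def _create_better_description(result, metadata):
--     """
--     Create better descriptions based on the type of result and available metadata
--     """
--     title = result.get('title', '').strip()
--     source = result.get('source', '')
--     url = result.get('url', '')
--
--     # For news articles found via reverse search, use the article title as description
--     if url and 'news' in url.lower() and title:
--         # Clean up the title to make it a better description
--         description = title
--         # Add context about military/naval content if it's relevant
--         if any(word in title.lower() for word in ['military', 'naval', 'vessel', 'ship', 'warship', 'submarine']):
--             description += " - military equipment photographed"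
--         elif any(word in title.lower() for word in ['missile', 'rocket', 'launcher']):
--             description += " - missile system photographed"
--         elif any(word in title.lower() for word in ['tank', 'armored', 'vehicle']):
--             description += " - armored vehicle photographed"
--         elif any(word in title.lower() for word in ['aircraft', 'fighter', 'jet']):
--             description += " - military aircraft photographed"
--         else:
--             description += " - military equipment documented"
--
--         return description
--
--     # For Google Vision web entities, try to make them more descriptive
--     elif source == 'Google Vision' and title:
--         # Google Vision often returns cryptic designations, try to interpret them
--         if 'STX' in title.upper():
--             return f"Military designation {title} - advanced military equipment photographed"
--         elif any(word in title.lower() for word in ['missile', 'rocket', 'launcher']):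
--             return f"Military missile system {title} photographed during operations"
--         elif any(word in title.lower() for word in ['tank', 'armored']):
--             return f"Armored military vehicle {title} in operational setting"
--         elif any(word in title.lower() for word in ['ship', 'navy', 'vessel']):
--             return f"Naval vessel {title} photographed at sea"
--         elif any(word in title.lower() for word in ['aircraft', 'fighter', 'jet']):
--             return f"Military aircraft {title} photographed during operations"
--         else:
--             return f"Military equipment designation {title} photographed in operational context"
--
--     # For AFP/Shutterstock style sources, use metadata description if available
--     elif source in ['AFP', 'Shutterstock', 'Reuters'] and metadata.get('description'):
--         return metadata['description']
--
--     # For other sources with titles, use the title as base description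
--     elif title and len(title) > 10:
--         return f"Military equipment: {title}"
--
--     # Fallback description
--     return f"Military equipment photographed from {source or 'online source'}"
-- ===== SOURCE B (Python) =====
-- # Different mechanism: one pass over a global keyword->bit index builds an
-- # integer bitmask of every keyword occurring in the title; the branches then
-- # select their template by bitwise tests against group masks, so the per-branch
-- # substring scans of A disappear.
--
-- _KEYWORD_BITS = [
--     ("military", 1), ("naval", 2), ("warship", 4), ("submarine", 8),
--     ("ship", 16), ("vessel", 32), ("navy", 64),
--     ("missile", 128), ("rocket", 256), ("launcher", 512),
--     ("tank", 1024), ("armored", 2048), ("vehicle", 4096),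
--     ("aircraft", 8192), ("fighter", 16384), ("jet", 32768),
-- ]
--
-- _NEWS_TABLE = [
--     (63, " - military equipment photographed"),      # military/naval/warship/submarine/ship/vessel
--     (896, " - missile system photographed"),         # missile/rocket/launcher
--     (7168, " - armored vehicle photographed"),       # tank/armored/vehicle
--     (57344, " - military aircraft photographed"),    # aircraft/fighter/jet
-- ]
--
-- _GV_TABLE = [
--     (896, ("Military missile system ", " photographed during operations")),
--     (3072, ("Armored military vehicle ", " in operational setting")),
--     (112, ("Naval vessel ", " photographed at sea")),
--     (57344, ("Military aircraft ", " photographed during operations")),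
-- ]
--
--
-- def _keyword_mask(tl):
--     mask = 0
--     for w, b in _KEYWORD_BITS:
--         if w in tl:
--             mask |= b
--     return mask
--
--
-- def _pick(mask, table, default):
--     for bits, tmpl in table:
--         if mask & bits:
--             return tmpl
--     return default
--
--
-- def _create_better_description(result, metadata):
--     title = result.get('title', '').strip()
--     source = result.get('source', '')
--     url = result.get('url', '')
--     mask = _keyword_mask(title.lower())
--
--     if url and 'news' in url.lower() and title:
--         return title + _pick(mask, _NEWS_TABLE, " - military equipment documented")
--
--     if source == 'Google Vision' and title:
--         if 'STX' in title.upper():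
--             return "Military designation " + title + " - advanced military equipment photographed"
--         pre, suf = _pick(mask, _GV_TABLE,
--                          ("Military equipment designation ", " photographed in operational context"))
--         return pre + title + suf
--
--     if source in ('AFP', 'Shutterstock', 'Reuters') and metadata.get('description'):
--         return metadata['description']
--
--     if len(title) > 10:
--         return "Military equipment: " + title
--
--     return "Military equipment photographed from " + (source or 'online source')
-- ===== Notes on version B (the rewrite author's own statement) =====
-- stated objective: alternative
-- what changed: A single pass over a global keyword->bit index builds an integer bitmask of the keywords present in the title once; each branch then chooses its template by bitwise AND tests against precomputed group masks instead of A's per-branch any(substring) cascades.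
import Mathlib
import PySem

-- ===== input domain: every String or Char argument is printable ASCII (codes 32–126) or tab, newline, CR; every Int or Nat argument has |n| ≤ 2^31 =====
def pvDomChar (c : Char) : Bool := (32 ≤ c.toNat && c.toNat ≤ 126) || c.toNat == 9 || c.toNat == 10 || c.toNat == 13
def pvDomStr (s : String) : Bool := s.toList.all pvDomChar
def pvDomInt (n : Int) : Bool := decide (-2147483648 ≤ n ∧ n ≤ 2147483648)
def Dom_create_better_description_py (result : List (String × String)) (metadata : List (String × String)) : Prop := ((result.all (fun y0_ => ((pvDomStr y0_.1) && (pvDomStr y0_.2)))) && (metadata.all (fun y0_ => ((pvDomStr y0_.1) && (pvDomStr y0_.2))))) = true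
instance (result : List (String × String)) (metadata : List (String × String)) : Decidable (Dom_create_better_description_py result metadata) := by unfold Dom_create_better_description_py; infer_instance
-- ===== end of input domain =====

-- B builds a keyword→bit mask of the title in one pass and selects each branch's template by bitwise tests against group masks, replacing A's per-branch any(substring) cascades (objective: alternative).

-- dict.get(k, dflt) on an association list: first match
def pvGetD (d : List (String × String)) (k dflt : String) : String :=
  match d.find? (fun p => p.1 == k) with
  | some p => p.2
  | none => dflt

-- ===== PORT A =====
def create_better_description_py (result : List (String × String)) (metadata : List (String × String)) : String :=
  let title := PySem.Str.strip (pvGetD result "title" "")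
  let source := pvGetD result "source" ""
  let url := pvGetD result "url" ""
  if url != "" && PySem.Str.isIn "news" (PySem.Str.lower url) && title != "" then
    let description := title
    let description :=
      if (["military", "naval", "vessel", "ship", "warship", "submarine"].any
            (fun w => PySem.Str.isIn w (PySem.Str.lower title))) then
        description ++ " - military equipment photographed"
      else if (["missile", "rocket", "launcher"].any
            (fun w => PySem.Str.isIn w (PySem.Str.lower title))) then
        description ++ " - missile system photographed"
      else if (["tank", "armored", "vehicle"].any
            (fun w => PySem.Str.isIn w (PySem.Str.lower title))) then
        description ++ " - armored vehicle photographed"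
      else if (["aircraft", "fighter", "jet"].any
            (fun w => PySem.Str.isIn w (PySem.Str.lower title))) then
        description ++ " - military aircraft photographed"
      else
        description ++ " - military equipment documented"
    description
  else if source == "Google Vision" && title != "" then
    if PySem.Str.isIn "STX" (PySem.Str.upper title) then
      "Military designation " ++ title ++ " - advanced military equipment photographed"
    else if (["missile", "rocket", "launcher"].any
          (fun w => PySem.Str.isIn w (PySem.Str.lower title))) then
      "Military missile system " ++ title ++ " photographed during operations"
    else if (["tank", "armored"].any
          (fun w => PySem.Str.isIn w (PySem.Str.lower title))) then
      "Armored military vehicle " ++ title ++ " in operational setting"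
    else if (["ship", "navy", "vessel"].any
          (fun w => PySem.Str.isIn w (PySem.Str.lower title))) then
      "Naval vessel " ++ title ++ " photographed at sea"
    else if (["aircraft", "fighter", "jet"].any
          (fun w => PySem.Str.isIn w (PySem.Str.lower title))) then
      "Military aircraft " ++ title ++ " photographed during operations"
    else
      "Military equipment designation " ++ title ++ " photographed in operational context"
  else if (source == "AFP" || source == "Shutterstock" || source == "Reuters")
      && pvGetD metadata "description" "" != "" then
    pvGetD metadata "description" ""
  else if title != "" && PySem.Str.len title > 10 then
    "Military equipment: " ++ title
  else
    "Military equipment photographed from " ++ (if source != "" then source else "online source")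

-- ===== PORT B =====
def pvKeywordBits : List (String × Nat) :=
  [ ("military", 1), ("naval", 2), ("warship", 4), ("submarine", 8),
    ("ship", 16), ("vessel", 32), ("navy", 64),
    ("missile", 128), ("rocket", 256), ("launcher", 512),
    ("tank", 1024), ("armored", 2048), ("vehicle", 4096),
    ("aircraft", 8192), ("fighter", 16384), ("jet", 32768) ]

def pvNewsTable : List (Nat × String) :=
  [ (63, " - military equipment photographed"),
    (896, " - missile system photographed"),
    (7168, " - armored vehicle photographed"),
    (57344, " - military aircraft photographed") ]

def pvGvTable : List (Nat × (String × String)) :=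
  [ (896, ("Military missile system ", " photographed during operations")),
    (3072, ("Armored military vehicle ", " in operational setting")),
    (112, ("Naval vessel ", " photographed at sea")),
    (57344, ("Military aircraft ", " photographed during operations")) ]

-- one pass over the keyword index, OR-ing the bit of every keyword occurring in tl
def pvKeywordMask (tl : String) : Nat :=
  List.foldl (fun m p => if PySem.Str.isIn p.1 tl then m ||| p.2 else m) 0 pvKeywordBits

-- first table entry whose bits intersect the mask, else the default
def pvPick {α : Type} (mask : Nat) (table : List (Nat × α)) (dflt : α) : α :=
  match table with
  | [] => dflt
  | (bits, t) :: rest => if mask &&& bits != 0 then t else pvPick mask rest dflt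

def create_better_description_py_alt (result : List (String × String)) (metadata : List (String × String)) : String :=
  let title := PySem.Str.strip (pvGetD result "title" "")
  let source := pvGetD result "source" ""
  let url := pvGetD result "url" ""
  let mask := pvKeywordMask (PySem.Str.lower title)
  if url != "" && PySem.Str.isIn "news" (PySem.Str.lower url) && title != "" then
    title ++ pvPick mask pvNewsTable " - military equipment documented"
  else if source == "Google Vision" && title != "" then
    if PySem.Str.isIn "STX" (PySem.Str.upper title) then
      "Military designation " ++ title ++ " - advanced military equipment photographed"
    else
      let ps := pvPick mask pvGvTable
        ("Military equipment designation ", " photographed in operational context")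
      ps.1 ++ title ++ ps.2
  else if (source == "AFP" || source == "Shutterstock" || source == "Reuters")
      && pvGetD metadata "description" "" != "" then
    pvGetD metadata "description" ""
  else if PySem.Str.len title > 10 then
    "Military equipment: " ++ title
  else
    "Military equipment photographed from " ++ (if source != "" then source else "online source")

-- ===== PRECONDITION & SPEC =====
def Spec_create_better_description_py (result : List (String × String)) (metadata : List (String × String)) (out : String) : Prop := out = create_better_description_py_alt result metadata
instance (result : List (String × String)) (metadata : List (String × String)) (out : String) : Decidable (Spec_create_better_description_py result metadata out) := by unfold Spec_create_better_description_py; infer_instance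

-- ===== CLAIM (what is proved, stated in full; the proofs are below) =====
def Claim_equal_create_better_description_py : Prop := ∀ (result : List (String × String)) (metadata : List (String × String)), Dom_create_better_description_py result metadata → Spec_create_better_description_py result metadata (create_better_description_py result metadata)

-- ===== LEMMAS AND PROOFS =====

theorem pv_lor_eq_zero (x y : Nat) : x ||| y = 0 ↔ x = 0 ∧ y = 0 := by
  constructor
  · intro h
    have hx : (x ||| y).testBit = fun i => false := by funext i; rw [h]; simp
    constructor <;>
      (apply Nat.eq_of_testBit_eq; intro i; have := congrFun hx i;
       simp [Nat.testBit_or] at this; simp [this])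
  · rintro ⟨rfl, rfl⟩; rfl

-- the mask intersected with a group is nonzero iff some keyword with a bit in the group occurs
theorem pv_mask_hit (f : String → Bool) (L : List (String × Nat)) (acc g : Nat) :
    ((List.foldl (fun m p => if f p.1 then m ||| p.2 else m) acc L) &&& g ≠ 0) ↔
      (acc &&& g ≠ 0 ∨ L.any (fun p => f p.1 && decide (p.2 &&& g ≠ 0))) := by
  induction L generalizing acc with
  | nil => simp
  | cons p rest ih =>
    simp only [List.foldl_cons, List.any_cons]
    cases hf : f p.1
    · simp [ih]
    · rw [if_pos rfl, ih, Nat.and_or_distrib_right]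
      simp only [ne_eq, pv_lor_eq_zero, not_and, Bool.true_and, Bool.or_eq_true,
        decide_eq_true_eq]
      tauto

theorem pv_hit_group (tl : String) (g : Nat) :
    (pvKeywordMask tl &&& g ≠ 0) ↔
      (pvKeywordBits.any (fun p => PySem.Str.isIn p.1 tl && decide (p.2 &&& g ≠ 0)) = true) := by
  have h := pv_mask_hit (fun w => PySem.Str.isIn w tl) pvKeywordBits 0 g
  unfold pvKeywordMask
  simpa using h

theorem pv_hit_news1 (tl : String) :
    (pvKeywordMask tl &&& 63 != 0) =
      (["military", "naval", "vessel", "ship", "warship", "submarine"].any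
        (fun w => PySem.Str.isIn w tl)) := by
  rw [Bool.eq_iff_iff]
  simp only [bne_iff_ne]
  rw [pv_hit_group]
  simp [pvKeywordBits]
  tauto

theorem pv_hit_missile (tl : String) :
    (pvKeywordMask tl &&& 896 != 0) =
      (["missile", "rocket", "launcher"].any (fun w => PySem.Str.isIn w tl)) := by
  rw [Bool.eq_iff_iff]
  simp only [bne_iff_ne]
  rw [pv_hit_group]
  simp [pvKeywordBits]

theorem pv_hit_armor3 (tl : String) :
    (pvKeywordMask tl &&& 7168 != 0) =
      (["tank", "armored", "vehicle"].any (fun w => PySem.Str.isIn w tl)) := by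
  rw [Bool.eq_iff_iff]
  simp only [bne_iff_ne]
  rw [pv_hit_group]
  simp [pvKeywordBits]

theorem pv_hit_air (tl : String) :
    (pvKeywordMask tl &&& 57344 != 0) =
      (["aircraft", "fighter", "jet"].any (fun w => PySem.Str.isIn w tl)) := by
  rw [Bool.eq_iff_iff]
  simp only [bne_iff_ne]
  rw [pv_hit_group]
  simp [pvKeywordBits]

theorem pv_hit_armor2 (tl : String) :
    (pvKeywordMask tl &&& 3072 != 0) =
      (["tank", "armored"].any (fun w => PySem.Str.isIn w tl)) := by
  rw [Bool.eq_iff_iff]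
  simp only [bne_iff_ne]
  rw [pv_hit_group]
  simp [pvKeywordBits]

theorem pv_hit_ship (tl : String) :
    (pvKeywordMask tl &&& 112 != 0) =
      (["ship", "navy", "vessel"].any (fun w => PySem.Str.isIn w tl)) := by
  rw [Bool.eq_iff_iff]
  simp only [bne_iff_ne]
  rw [pv_hit_group]
  simp [pvKeywordBits]
  tauto

-- len(title) > 10 implies title nonempty, so A's extra 'title != ""' test is redundant
theorem pv_len_ne (s : String) (h : 10 < (PySem.Chars.strip s.toList).length) :
    ¬ PySem.Str.strip s = "" := by
  intro h0
  have h1 : (PySem.Str.strip s).toList = [] := by rw [h0]; rfl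
  rw [PySem.Str.toList_strip] at h1
  simp [h1] at h

-- A's fourth guard 'title and len(title) > 10': the nonemptiness test is redundant
theorem pv_cond4 (t : String) :
    (t != "" && decide (PySem.Str.len t > 10)) = decide (PySem.Str.len t > 10) := by
  cases ht : decide (PySem.Str.len t > 10)
  · simp
  · have hgt := of_decide_eq_true ht
    have hne : t ≠ "" := by intro h0; subst h0; revert hgt; decide
    simp [hne]

set_option maxHeartbeats 1000000 in
theorem pv_main (result metadata : List (String × String)) :
    create_better_description_py result metadata = create_better_description_py_alt result metadata := by
  unfold create_better_description_py create_better_description_py_alt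
  simp only [pv_cond4, pvNewsTable, pvGvTable, pvPick,
    pv_hit_news1, pv_hit_missile, pv_hit_armor3, pv_hit_air, pv_hit_armor2, pv_hit_ship]
  split_ifs <;> first | rfl | (simp_all [pv_len_ne]; try omega)

-- ===== VERDICT (by name: the statement is the Claim_ definition above) =====
theorem create_better_description_py_spec : Claim_equal_create_better_description_py := by
  intro result metadata _
  exact pv_main result metadata
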